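-- pv_equiv track=rewrite | github.com/VishwamAI/Generative-Flex | fix_syntax_patterns_final_v63.py | fix_import_statements
-- ===== SOURCE A (Python) =====
-- def fix_import_statements(content: str) -> str:
--     """Fix import statement formatting."""
--     # Remove extra indentation from imports at the start of file
--     lines = content.split('\n')
--     fixed_lines = []
--     in_imports = True
--
--     for line in lines:
--         if in_imports and (line.strip().startswith('import ') or line.strip().startswith('from ')):
--             fixed_lines.append(line.strip())
--         else:
--             in_imports = False
--             fixed_lines.append(line)
--
--     return '\n'.join(fixed_lines)
-- ===== SOURCE B (Python) =====
-- def fix_import_statements(content: str) -> str: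
--     """Fix import statement formatting."""
--     # Stream over the raw string: peel off leading import lines (stripped),
--     # and return the rest of the string verbatim as one substring.
--     out = []
--     rest = content
--     while True:
--         nl = rest.find('\n')
--         line = rest if nl == -1 else rest[:nl]
--         s = line.strip()
--         if s.startswith('import ') or s.startswith('from '):
--             out.append(s)
--             if nl == -1:
--                 return '\n'.join(out)
--             rest = rest[nl + 1:]
--         else:
--             return ''.join(x + '\n' for x in out) + rest
-- ===== Notes on version B (the rewrite author's own statement) =====
-- stated objective: alternative
-- what changed: Replaces A's split-into-line-list plus stateful in_imports-flag fold with a stream over the raw string: repeatedly locate the next newline with str.find, strip and emit leading import lines, and return the remaining suffix verbatim as a single substring the moment a non-import line starts.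
import Mathlib
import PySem

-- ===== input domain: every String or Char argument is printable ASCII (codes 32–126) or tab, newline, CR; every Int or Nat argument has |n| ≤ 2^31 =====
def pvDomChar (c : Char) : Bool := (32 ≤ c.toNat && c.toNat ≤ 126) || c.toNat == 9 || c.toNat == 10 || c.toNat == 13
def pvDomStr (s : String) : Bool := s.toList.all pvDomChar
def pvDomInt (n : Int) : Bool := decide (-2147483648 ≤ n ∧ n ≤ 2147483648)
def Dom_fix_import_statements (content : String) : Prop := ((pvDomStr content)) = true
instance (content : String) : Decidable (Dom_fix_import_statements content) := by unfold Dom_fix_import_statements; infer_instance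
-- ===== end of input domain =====

-- B streams over the raw string with find('\n') instead of splitting into a line list:
-- it strips leading import lines and returns the remaining suffix verbatim (objective: alternative).

-- ===== PORT A =====
-- the per-line test A performs inside the loop
def pvIsImport (line : String) : Bool :=
  PySem.Str.startswith (PySem.Str.strip line) "import " ||
  PySem.Str.startswith (PySem.Str.strip line) "from "

-- A's loop body: (fixed_lines, in_imports) state
def pvStepA (st : List String × Bool) (line : String) : List String × Bool :=
  if st.2 && pvIsImport line then (st.1 ++ [PySem.Str.strip line], st.2)
  else (st.1 ++ [line], false)

def fix_import_statements (content : String) : String :=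
  -- split? with the non-empty literal separator "\n" is always `some`
  let lines := (PySem.Str.split? content "\n").getD []
  let st := lines.foldl pvStepA ([], true)
  PySem.Str.join "\n" st.1

-- ===== PORT B =====
-- termination of Source B's while loop: when find succeeds, the suffix kept gets strictly shorter
theorem pvFind_lt (rest : List Char) (h : ¬ PySem.Chars.find rest ['\n'] = -1) :
    (PySem.Chars.find rest ['\n']).toNat < rest.length := by
  have h0 : 0 ≤ PySem.Chars.find rest ['\n'] := by
    have := PySem.Chars.neg_one_le_find rest ['\n']; omega
  have hpre := (PySem.Chars.find_spec h0).1
  have hne : rest.drop (PySem.Chars.find rest ['\n']).toNat ≠ [] := by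
    intro hnil; rw [hnil] at hpre; exact absurd (List.prefix_nil.mp hpre) (by simp)
  have hle : ¬ rest.length ≤ (PySem.Chars.find rest ['\n']).toNat :=
    fun hle => hne (List.drop_eq_nil_of_le hle)
  omega

-- Source B's while loop: out = stripped import lines so far, rest = the unscanned suffix
def pvGoB (out : List (List Char)) (rest : List Char) : List Char :=
  let nl := PySem.Chars.find rest ['\n']
  let line := if nl = -1 then rest else rest.take nl.toNat
  let s := PySem.Chars.strip line
  if PySem.Chars.startswith s "import ".toList || PySem.Chars.startswith s "from ".toList then
    if h : nl = -1 then PySem.Chars.join ['\n'] (out ++ [s])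
    else pvGoB (out ++ [s]) (rest.drop (nl.toNat + 1))
  else (out.flatMap (fun x => x ++ ['\n'])) ++ rest
termination_by rest.length
decreasing_by
  have := pvFind_lt rest h
  simp only [List.length_drop]; omega

def fix_import_statements_alt (content : String) : String :=
  String.ofList (pvGoB [] content.toList)

-- ===== PRECONDITION & SPEC =====
def Spec_fix_import_statements (content : String) (out : String) : Prop := out = fix_import_statements_alt content
instance (content : String) (out : String) : Decidable (Spec_fix_import_statements content out) := by unfold Spec_fix_import_statements; infer_instance

-- ===== CLAIM (what is proved, stated in full; the proofs are below) =====
def Claim_equal_fix_import_statements : Prop := ∀ (content : String), Dom_fix_import_statements content → Spec_fix_import_statements content (fix_import_statements content)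

-- ===== LEMMAS AND PROOFS =====

-- clean structural model of splitting on '\n'
def pvSplit : List Char → List (List Char)
  | [] => [[]]
  | x :: xs => if x = '\n' then [] :: pvSplit xs
               else (x :: (pvSplit xs).headI) :: (pvSplit xs).tail

theorem pvSplit_ne_nil (cs : List Char) : pvSplit cs ≠ [] := by
  cases cs with
  | nil => simp [pvSplit]
  | cons x xs => by_cases h : x = '\n' <;> simp [pvSplit, h]

theorem pvSplitOn_go_spec (fuel : Nat) (l cur : List Char) (acc : List (List Char))
    (h : l.length < fuel) :
    PySem.Chars.splitOn.go ['\n'] fuel l cur acc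
      = acc.reverse ++ ((cur.reverse ++ (pvSplit l).headI) :: (pvSplit l).tail) := by
  induction fuel generalizing l cur acc with
  | zero => omega
  | succ n ih =>
    cases l with
    | nil => rw [PySem.Chars.splitOn.go.eq_def]; simp [pvSplit]
    | cons c rest =>
      rw [PySem.Chars.splitOn.go.eq_def]
      simp only []
      by_cases hc : c = '\n'
      · have hp : List.isPrefixOf ['\n'] (c :: rest) = true := by simp [List.isPrefixOf, hc]
        rw [if_pos hp, show List.drop (['\n'] : List Char).length (c :: rest) = rest by simp]
        rw [ih rest [] (cur.reverse :: acc) (by simp at h ⊢; omega)]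
        obtain ⟨y, ys, hy⟩ := List.exists_cons_of_ne_nil (pvSplit_ne_nil rest)
        simp [pvSplit, hc, hy]
      · have hp : List.isPrefixOf ['\n'] (c :: rest) = false := by
          simp [List.isPrefixOf]; exact fun hh => hc hh.symm
        rw [if_neg (by simp [hp])]
        rw [ih rest (c :: cur) acc (by simp at h ⊢; omega)]
        simp [pvSplit, hc]

theorem pvSplitOn_eq (cs : List Char) :
    PySem.Chars.splitOn cs ['\n'] = pvSplit cs := by
  unfold PySem.Chars.splitOn
  rw [pvSplitOn_go_spec cs.length.succ cs [] [] (by omega)]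
  obtain ⟨y, ys, hy⟩ := List.exists_cons_of_ne_nil (pvSplit_ne_nil cs)
  rw [hy]
  simp

-- joining the split back gives the original string
theorem pvJoin_pvSplit (cs : List Char) :
    PySem.Chars.join ['\n'] (pvSplit cs) = cs := by
  induction cs with
  | nil => simp [pvSplit, PySem.Chars.join_singleton]
  | cons x xs ih =>
    obtain ⟨y, ys, hy⟩ := List.exists_cons_of_ne_nil (pvSplit_ne_nil xs)
    rw [hy] at ih
    by_cases h : x = '\n'
    · simp only [pvSplit, if_pos h, hy]
      rw [PySem.Chars.join_cons_cons]
      simp [h, ih]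
    · simp only [pvSplit, if_neg h, hy]
      cases ys with
      | nil =>
        simp only [List.headI, List.tail]
        rw [PySem.Chars.join_singleton] at ih ⊢
        rw [ih]
      | cons z zs =>
        simp only [List.headI, List.tail]
        rw [PySem.Chars.join_cons_cons] at ih ⊢
        rw [← ih]
        simp

-- joining with a nonempty remainder: the accumulated head lines each get a newline
theorem pvJoin_append (out : List (List Char)) (l : List Char) (ls : List (List Char)) :
    PySem.Chars.join ['\n'] (out ++ l :: ls)
      = (out.flatMap (fun x => x ++ ['\n'])) ++ PySem.Chars.join ['\n'] (l :: ls) := by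
  induction out with
  | nil => simp
  | cons a as ih =>
    cases as with
    | nil =>
      simp only [List.nil_append, List.cons_append]
      rw [PySem.Chars.join_cons_cons]
      simp
    | cons b bs =>
      simp only [List.cons_append]
      rw [PySem.Chars.join_cons_cons,
        show (b :: (bs ++ l :: ls)) = (b :: bs) ++ l :: ls from rfl, ih]
      simp

-- pvSplit through the first newline found
theorem pvSplit_of_no_nl (cs : List Char) (h : '\n' ∉ cs) : pvSplit cs = [cs] := by
  induction cs with
  | nil => simp [pvSplit]
  | cons x xs ih =>
    simp at h
    have hx : ¬ x = '\n' := fun e => h.1 e.symm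
    simp [pvSplit, hx, ih h.2]

theorem pvSplit_of_nl (cs : List Char) (k : Nat) (hk : cs[k]? = some '\n')
    (hmin : ∀ i < k, cs[i]? ≠ some '\n') :
    pvSplit cs = cs.take k :: pvSplit (cs.drop (k + 1)) := by
  induction cs generalizing k with
  | nil => simp at hk
  | cons x xs ih =>
    cases k with
    | zero => simp at hk; simp [pvSplit, hk]
    | succ k =>
      have hx : x ≠ '\n' := by
        have := hmin 0 (by omega); simpa using this
      have := ih k (by simpa using hk) (fun i hi => by simpa using hmin (i + 1) (by omega))
      simp [pvSplit, hx, this]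

-- singleton prefix ↔ indexed character
theorem pvPrefix_single (l : List Char) : ['\n'] <+: l ↔ l[0]? = some '\n' := by
  cases l with
  | nil => simp
  | cons a as => simp [List.cons_prefix_cons, eq_comm]

-- the two find cases, phrased on pvSplit
theorem pvFind_neg_split (rest : List Char) (h : PySem.Chars.find rest ['\n'] = -1) :
    pvSplit rest = [rest] := by
  apply pvSplit_of_no_nl
  intro hm
  obtain ⟨s, t, hst⟩ := List.append_of_mem hm
  exact ((PySem.Chars.find_eq_neg_one_iff rest ['\n']).mp h)
    ⟨s, t, by rw [hst]; simp⟩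

theorem pvFind_pos_split (rest : List Char) (h : ¬ PySem.Chars.find rest ['\n'] = -1) :
    pvSplit rest
      = rest.take (PySem.Chars.find rest ['\n']).toNat
          :: pvSplit (rest.drop ((PySem.Chars.find rest ['\n']).toNat + 1)) := by
  have h0 : 0 ≤ PySem.Chars.find rest ['\n'] := by
    have := PySem.Chars.neg_one_le_find rest ['\n']; omega
  obtain ⟨hpre, hmin⟩ := PySem.Chars.find_spec h0
  apply pvSplit_of_nl
  · have := (pvPrefix_single _).mp hpre
    simpa [List.getElem?_drop] using this
  · intro i hi hc
    exact hmin i hi ((pvPrefix_single _).mpr (by simpa [List.getElem?_drop] using hc))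

-- the char-level import test and prefix-stripping map
def pvIsImpC (l : List Char) : Bool :=
  PySem.Chars.startswith (PySem.Chars.strip l) "import ".toList ||
  PySem.Chars.startswith (PySem.Chars.strip l) "from ".toList

def pvStrip : List (List Char) → List (List Char)
  | [] => []
  | l :: ls => if pvIsImpC l then PySem.Chars.strip l :: pvStrip ls else l :: ls

-- B's loop computes: join the stripped import prefix with the split remainder
theorem pvGoB_spec (rest : List Char) (out : List (List Char)) :
    pvGoB out rest = PySem.Chars.join ['\n'] (out ++ pvStrip (pvSplit rest)) := by
  by_cases h : PySem.Chars.find rest ['\n'] = -1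
  · rw [pvGoB]
    simp only [h, reduceIte, reduceDIte]
    rw [pvFind_neg_split rest h]
    by_cases hi : pvIsImpC rest
    · rw [if_pos (by simpa [pvIsImpC] using hi)]
      simp [pvStrip, hi]
    · rw [if_neg (by simpa [pvIsImpC] using hi)]
      rw [show pvStrip [rest] = [rest] by simp [pvStrip, hi]]
      rw [pvJoin_append out rest []]
      simp [PySem.Chars.join_singleton]
  · rw [pvGoB]
    simp only [if_neg h, dif_neg h]
    rw [pvFind_pos_split rest h]
    set n := (PySem.Chars.find rest ['\n']).toNat with hn
    by_cases hi : pvIsImpC (rest.take n)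
    · rw [if_pos (by simpa [pvIsImpC] using hi)]
      have hlt : n < rest.length := pvFind_lt rest h
      have := pvGoB_spec (rest.drop (n + 1)) (out ++ [PySem.Chars.strip (rest.take n)])
      rw [this]
      simp [pvStrip, hi]
    · rw [if_neg (by simpa [pvIsImpC] using hi)]
      rw [show pvStrip (rest.take n :: pvSplit (rest.drop (n + 1)))
            = rest.take n :: pvSplit (rest.drop (n + 1)) by simp [pvStrip, hi]]
      rw [pvJoin_append out _ _]
      congr 1
      rw [← pvFind_pos_split rest h, pvJoin_pvSplit]
termination_by rest.length
decreasing_by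
  have := pvFind_lt rest h
  simp only [List.length_drop]; omega

-- A-side: the String-level step bridged to Chars
theorem pvIsImport_ofList (l : List Char) : pvIsImport (String.ofList l) = pvIsImpC l := by
  simp [pvIsImport, pvIsImpC]

theorem pvStrip_ofList (l : List Char) :
    PySem.Str.strip (String.ofList l) = String.ofList (PySem.Chars.strip l) := by
  apply String.toList_inj.mp
  simp

-- once the flag is false, A's loop just appends every remaining line
theorem pvFoldl_false (ls : List String) (acc : List String) :
    ls.foldl pvStepA (acc, false) = (acc ++ ls, false) := by
  induction ls generalizing acc with
  | nil => simp
  | cons l ls ih =>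
    rw [List.foldl_cons]
    show List.foldl pvStepA (pvStepA (acc, false) l) ls = _
    rw [show pvStepA (acc, false) l = (acc ++ [l], false) from by simp [pvStepA], ih]
    simp

-- with the flag true, A's loop over the (ofList-mapped) lines computes pvStrip
theorem pvFoldl_true (ls : List (List Char)) (acc : List String) :
    ((ls.map String.ofList).foldl pvStepA (acc, true)).1
      = acc ++ (pvStrip ls).map String.ofList := by
  induction ls generalizing acc with
  | nil => simp [pvStrip]
  | cons l ls ih =>
    rw [List.map_cons, List.foldl_cons]
    by_cases hi : pvIsImpC l
    · rw [show pvStepA (acc, true) (String.ofList l)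
            = (acc ++ [String.ofList (PySem.Chars.strip l)], true) from by
          simp [pvStepA, pvIsImport_ofList, hi, pvStrip_ofList]]
      rw [ih]
      simp [pvStrip, hi]
    · rw [show pvStepA (acc, true) (String.ofList l) = (acc ++ [String.ofList l], false) from by
          simp [pvStepA, pvIsImport_ofList, hi]]
      rw [pvFoldl_false]
      simp [pvStrip, hi]

-- Str.join over ofList-mapped parts is ofList of the Chars join
theorem pvJoin_ofList (ls : List (List Char)) :
    PySem.Str.join "\n" (ls.map String.ofList) = String.ofList (PySem.Chars.join ['\n'] ls) := by
  apply String.toList_inj.mp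
  rw [PySem.Str.toList_join]
  simp [Function.comp_def]

-- ===== VERDICT (by name: the statement is the Claim_ definition above) =====
theorem fix_import_statements_spec : Claim_equal_fix_import_statements := by
  intro content _
  show fix_import_statements content = fix_import_statements_alt content
  unfold fix_import_statements fix_import_statements_alt
  rw [pvGoB_spec]
  simp only [PySem.Str.split?, PySem.Chars.split?]
  rw [if_neg (by simp), show ("\n" : String).toList = ['\n'] from rfl, pvSplitOn_eq]
  simp only [Option.map_some, Option.getD_some, List.nil_append]
  rw [pvFoldl_true (pvSplit content.toList) []]
  simp only [List.nil_append]
  exact pvJoin_ofList _
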